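-- pv_equiv track=rewrite | github.com/Nghia03092004/nghia03092004.github.io | project_euler_unified/problem_730/solution.py | P_k
-- ===== SOURCE A (Python) =====
-- from math import gcd, isqrt
--
-- def divisors(n):
--     """Return sorted list of divisors of n."""
--     divs = []
--     d = 1
--     while d * d <= n:
--         if n % d == 0:
--             divs.append(d)
--             if d != n // d:
--                 divs.append(n // d)
--         d += 1
--     return sorted(divs)
--
-- def P_k(k, n):
--     """Count primitive k-shifted Pythagorean triples with p+q+r <= n."""
--     count = 0
--     for p in range(1, n // 3 + 1):
--         val = p * p + k
--         for d1 in divisors(val):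
--             d2 = val // d1
--             if d1 > d2:
--                 break
--             if (d1 % 2) != (d2 % 2):
--                 continue
--             q = (d2 - d1) // 2
--             r = (d1 + d2) // 2
--             if q < p:
--                 continue
--             if p + q + r > n:
--                 continue
--             if gcd(gcd(p, q), r) != 1:
--                 continue
--             count += 1
--     return count
-- ===== SOURCE B (Python) =====
-- from math import gcd, isqrt
--
-- def P_k(k, n):
--     """Count primitive k-shifted Pythagorean triples with p+q+r <= n."""
--     count = 0
--     for p in range(1, n // 3 + 1):
--         for q in range(p, (n - p - 1) // 2 + 1):
--             s = p * p + k + q * q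
--             if s <= 0:
--                 continue
--             r = isqrt(s)
--             if r * r != s or r <= q:
--                 continue
--             if p + q + r > n or gcd(gcd(p, q), r) != 1:
--                 continue
--             count += 1
--     return count
-- ===== Notes on version B (the rewrite author's own statement) =====
-- stated objective: alternative
-- what changed: B abandons divisor enumeration entirely: using r^2 - q^2 = p^2 + k it enumerates the candidate leg q from p up to (n-p-1)//2, takes r = isqrt(p*p+k+q*q) and counts q when that is an exact square root with r > q, p+q+r <= n and gcd 1, so no divisor list, no sort and no divisibility scan exist in B.
import Mathlib
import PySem

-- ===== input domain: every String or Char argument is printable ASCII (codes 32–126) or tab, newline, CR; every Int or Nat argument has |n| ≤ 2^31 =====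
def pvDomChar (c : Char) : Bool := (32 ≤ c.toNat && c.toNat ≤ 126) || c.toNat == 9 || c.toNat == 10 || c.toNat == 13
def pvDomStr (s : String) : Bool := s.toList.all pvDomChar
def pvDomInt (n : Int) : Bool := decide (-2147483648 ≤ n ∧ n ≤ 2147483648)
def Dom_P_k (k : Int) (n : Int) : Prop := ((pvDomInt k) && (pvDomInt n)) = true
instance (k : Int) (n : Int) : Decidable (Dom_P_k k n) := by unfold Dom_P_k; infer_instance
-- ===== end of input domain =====

-- B replaces A's divisor enumeration of p^2+k by a direct search over the leg q with a
-- perfect-square test for r (r^2 - q^2 = p^2 + k); alternative algorithm, similar cost.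

-- ===== PORT A =====
-- termination measure lemma for divisorsAux (cited by name in decreasing_by)
theorem divisorsAux_dec (val d : Int) (h : d * d ≤ val) :
    (val + 1 - (d + 1)).toNat < (val + 1 - d).toNat := by
  have hdv : d ≤ val := by nlinarith [mul_self_nonneg d, mul_self_nonneg (d - 1)]
  omega

-- Python divisors(): while d*d <= n collect d and n//d, then sorted(...)
def divisorsAux (val : Int) (d : Int) (divs : List Int) : List Int :=
  if h : d * d ≤ val then
    divisorsAux val (d + 1)
      (if PySem.Int.mod val d = 0 then
        divs ++ [d] ++ (if d ≠ PySem.Int.floordiv val d then [PySem.Int.floordiv val d] else [])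
      else divs)
  else divs
termination_by (val + 1 - d).toNat
decreasing_by exact divisorsAux_dec val d h

def divisors (val : Int) : List Int :=
  PySem.List.sorted (divisorsAux val 1 []) (fun x => x) false

-- the inner 'for d1 in divisors(val)' loop of A, with its break/continues
def loopA (p n val : Int) : List Int → Int → Int
  | [], c => c
  | d1 :: rest, c =>
    let d2 := PySem.Int.floordiv val d1
    if d1 > d2 then c
    else if PySem.Int.mod d1 2 ≠ PySem.Int.mod d2 2 then loopA p n val rest c
    else
      let q := PySem.Int.floordiv (d2 - d1) 2
      let r := PySem.Int.floordiv (d1 + d2) 2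
      if q < p then loopA p n val rest c
      else if p + q + r > n then loopA p n val rest c
      else if Int.gcd (Int.gcd p q) r ≠ 1 then loopA p n val rest c
      else loopA p n val rest (c + 1)

def P_k (k : Int) (n : Int) : Int :=
  (PySem.List.pyRange 1 (PySem.Int.floordiv n 3 + 1) 1).foldl
    (fun c p => loopA p n (p * p + k) (divisors (p * p + k)) c) 0

-- ===== PORT B =====
-- Source B: for q in range(p, (n-p-1)//2 + 1): s = p*p+k+q*q; r = isqrt(s); perfect-square test
def P_k_alt (k : Int) (n : Int) : Int :=
  (PySem.List.pyRange 1 (PySem.Int.floordiv n 3 + 1) 1).foldl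
    (fun c p =>
      (PySem.List.pyRange p (PySem.Int.floordiv (n - p - 1) 2 + 1) 1).foldl
        (fun c q =>
          let s := p * p + k + q * q
          if s ≤ 0 then c
          else
            let r := (Nat.sqrt s.toNat : Int)
            if r * r ≠ s ∨ r ≤ q then c
            else if p + q + r > n ∨ Int.gcd (Int.gcd p q) r ≠ 1 then c
            else c + 1) c) 0

-- ===== PRECONDITION & SPEC =====
def Spec_P_k (k : Int) (n : Int) (out : Int) : Prop := out = P_k_alt k n
instance (k : Int) (n : Int) (out : Int) : Decidable (Spec_P_k k n out) := by unfold Spec_P_k; infer_instance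

-- ===== CLAIM =====
def Claim_equal_P_k : Prop := ∀ (k : Int) (n : Int), Dom_P_k k n → Spec_P_k k n (P_k k n)

-- ===== LEMMAS AND PROOFS =====

-- proof-side predicate: A's filter cascade on a divisor d1 of val (no lets, for rewriting)
def passB (p n val d1 : Int) : Bool :=
  if PySem.Int.mod d1 2 ≠ PySem.Int.mod (PySem.Int.floordiv val d1) 2 then false
  else if PySem.Int.floordiv (PySem.Int.floordiv val d1 - d1) 2 < p then false
  else if p + PySem.Int.floordiv (PySem.Int.floordiv val d1 - d1) 2 +
          PySem.Int.floordiv (d1 + PySem.Int.floordiv val d1) 2 > n then false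
  else if Int.gcd (Int.gcd p (PySem.Int.floordiv (PySem.Int.floordiv val d1 - d1) 2))
          (PySem.Int.floordiv (d1 + PySem.Int.floordiv val d1) 2) ≠ 1 then false
  else true

-- proof-side predicate: B's per-q test
def predB (p n k q : Int) : Bool :=
  if p * p + k + q * q ≤ 0 then false
  else if (Nat.sqrt (p * p + k + q * q).toNat : Int) * (Nat.sqrt (p * p + k + q * q).toNat : Int)
            ≠ p * p + k + q * q
          ∨ (Nat.sqrt (p * p + k + q * q).toNat : Int) ≤ q then false
  else if p + q + (Nat.sqrt (p * p + k + q * q).toNat : Int) > n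
          ∨ Int.gcd (Int.gcd p q) (Nat.sqrt (p * p + k + q * q).toNat : Int) ≠ 1 then false
  else true

-- the q and r a divisor d1 of val gives rise to
def qOf (val d1 : Int) : Int := PySem.Int.floordiv (PySem.Int.floordiv val d1 - d1) 2
def rOf (val d1 : Int) : Int := PySem.Int.floordiv (d1 + PySem.Int.floordiv val d1) 2
def rB (p k q : Int) : Int := (Nat.sqrt (p * p + k + q * q).toNat : Int)

-- the break-survival predicate d1 <= val // d1
def smallP (val d : Int) : Bool := decide (d ≤ PySem.Int.floordiv val d)
def dvdP (val d : Int) : Bool := decide (PySem.Int.mod val d = 0)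

theorem loopA_cons (p n val d1 : Int) (rest : List Int) (c : Int) :
    loopA p n val (d1 :: rest) c
      = if smallP val d1 then loopA p n val rest (c + if passB p n val d1 then 1 else 0) else c := by
  simp only [loopA, passB]
  by_cases h1 : d1 > PySem.Int.floordiv val d1
  · have hs : ¬ (smallP val d1 = true) := by simp only [smallP, decide_eq_true_eq]; omega
    rw [if_pos h1, if_neg hs]
  · have hs : smallP val d1 = true := by simp only [smallP, decide_eq_true_eq]; omega
    rw [if_neg h1, if_pos hs]
    split_ifs <;> first | rfl | simp_all
theorem loopA_eq (p n val : Int) :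
    ∀ (L : List Int) (c : Int),
      loopA p n val L c = c + ((L.takeWhile (smallP val)).countP (passB p n val) : Int) := by
  intro L
  induction L with
  | nil => intro c; simp [loopA]
  | cons d1 rest ih =>
    intro c
    rw [loopA_cons]
    by_cases hs : smallP val d1
    · rw [if_pos hs, ih, List.takeWhile_cons, if_pos hs, List.countP_cons]
      by_cases hp : passB p n val d1
      · rw [if_pos hp, if_pos hp]; omega
      · rw [if_neg hp, if_neg hp]; omega
    · rw [if_neg hs, List.takeWhile_cons, if_neg hs]
      simp only [List.countP_nil, Nat.cast_zero, add_zero]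

theorem smallP_iff (val d : Int) (hd : 1 ≤ d) : smallP val d = true ↔ d * d ≤ val := by
  rw [smallP, decide_eq_true_eq, PySem.Int.le_floordiv_iff_mul_le (by omega)]

theorem takeWhile_eq_filter (val : Int) :
    ∀ (L : List Int), L.Pairwise (· ≤ ·) → (∀ x ∈ L, 1 ≤ x) →
      L.takeWhile (smallP val) = L.filter (smallP val) := by
  intro L
  induction L with
  | nil => intro _ _; rfl
  | cons a rest ih =>
    intro hpw hpos
    rw [List.pairwise_cons] at hpw
    by_cases hs : smallP val a
    · rw [List.takeWhile_cons, if_pos hs, List.filter_cons, if_pos hs,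
        ih hpw.2 (fun x hx => hpos x (List.mem_cons_of_mem _ hx))]
    · rw [List.takeWhile_cons, if_neg hs, List.filter_cons, if_neg hs]
      have h0 : rest.filter (smallP val) = [] := by
        rw [List.filter_eq_nil_iff]
        intro b hb hsb
        apply hs
        have ha : 1 ≤ a := hpos a (List.mem_cons_self ..)
        have hab : a ≤ b := hpw.1 b hb
        rw [smallP_iff val b (by omega)] at hsb
        rw [smallP_iff val a ha]
        nlinarith
      rw [h0]

theorem mem_divisorsAux (val : Int) :
    ∀ (d : Int) (acc : List Int), 1 ≤ d →
      ∀ x ∈ divisorsAux val d acc, x ∈ acc ∨ 1 ≤ x := by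
  intro d acc
  induction d, acc using divisorsAux.induct val with
  | case1 d acc h ih =>
    intro hd x hx
    rw [divisorsAux, dif_pos h] at hx
    have hde : d ≤ PySem.Int.floordiv val d :=
      (PySem.Int.le_floordiv_iff_mul_le (by omega)).mpr h
    rcases ih (by omega) x hx with hacc | h1
    · by_cases hm : PySem.Int.mod val d = 0
      · rw [dif_pos hm] at hacc
        simp only [List.append_assoc, List.mem_append, List.mem_singleton] at hacc
        rcases hacc with hacc | hx1 | htl
        · exact Or.inl hacc
        · subst hx1; omega
        · right
          by_cases hne : d ≠ PySem.Int.floordiv val d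
          · rw [dif_pos hne] at htl; simp only [List.mem_singleton] at htl; omega
          · rw [dif_neg hne] at htl; cases htl
      · rw [dif_neg hm] at hacc; exact Or.inl hacc
    · exact Or.inr h1
  | case2 d acc h =>
    intro _ x hx
    rw [divisorsAux, dif_neg h] at hx
    exact Or.inl hx

theorem filter_divisorsAux (val : Int) (hval : 1 ≤ val) :
    ∀ (d : Int) (acc : List Int), 1 ≤ d →
      (divisorsAux val d acc).filter (smallP val)
        = acc.filter (smallP val)
          ++ (PySem.List.pyRange d ((Nat.sqrt val.toNat : Int) + 1) 1).filter (dvdP val) := by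
  intro d acc
  induction d, acc using divisorsAux.induct val with
  | case1 d acc h ih =>
    intro hd
    have hde : d ≤ PySem.Int.floordiv val d :=
      (PySem.Int.le_floordiv_iff_mul_le (by omega)).mpr h
    have hdn : (d.toNat : Int) = d := Int.toNat_of_nonneg (by omega)
    have hsq : d.toNat ≤ Nat.sqrt val.toNat := by
      rw [Nat.le_sqrt]
      have : ((d.toNat * d.toNat : Nat) : Int) ≤ ((val.toNat : Nat) : Int) := by
        push_cast [hdn]
        omega
      exact_mod_cast this
    have hdS : d ≤ (Nat.sqrt val.toNat : Int) := by omega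
    have ih' := ih (by omega)
    simp only [dite_eq_ite] at ih'
    rw [divisorsAux, dif_pos h, ih',
      PySem.List.pyRange_one_cons (a := d) (b := (Nat.sqrt val.toNat : Int) + 1) (by omega),
      List.filter_cons]
    by_cases hm : PySem.Int.mod val d = 0
    · have hdvd : dvdP val d = true := by simp only [dvdP, decide_eq_true_eq]; exact hm
      have hsd : smallP val d = true := by simp only [smallP, decide_eq_true_eq]; omega
      rw [if_pos hm, hdvd, if_pos rfl]
      by_cases hne : d ≠ PySem.Int.floordiv val d
      · have he : ¬ (smallP val (PySem.Int.floordiv val d) = true) := by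
          simp only [smallP, decide_eq_true_eq]
          rw [PySem.Int.le_floordiv_iff_mul_le (by omega), not_le]
          have hbr := (PySem.Int.floordiv_eq_iff_of_pos (a := val) (b := d)
            (q := PySem.Int.floordiv val d) (by omega)).mp rfl
          have hdlt : d + 1 ≤ PySem.Int.floordiv val d := by omega
          nlinarith [hbr.1, hbr.2,
            mul_le_mul_of_nonneg_left hdlt (show (0:ℤ) ≤ PySem.Int.floordiv val d by omega)]
        rw [if_pos hne]
        simp only [List.filter_append, List.filter_cons, List.filter_nil, hsd, if_pos rfl,
          he, if_false]
        simp only [if_true, Bool.false_eq_true, if_false, List.append_assoc, List.cons_append,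
          List.nil_append, List.append_nil, List.singleton_append]
      · rw [if_neg hne]
        simp only [List.filter_append, List.filter_cons, List.filter_nil, hsd, if_pos rfl]
        simp only [if_true, Bool.false_eq_true, if_false, List.append_assoc, List.cons_append,
          List.nil_append, List.append_nil, List.singleton_append]
    · have hdvd : ¬ (dvdP val d = true) := by simp only [dvdP, decide_eq_true_eq]; exact hm
      rw [if_neg hm, if_neg hdvd]
  | case2 d acc h =>
    intro hd
    have hlt : Nat.sqrt val.toNat < d.toNat := by
      rw [Nat.sqrt_lt]
      have hdn : (d.toNat : Int) = d := Int.toNat_of_nonneg (by omega)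
      have : ((val.toNat : Nat) : Int) < ((d.toNat * d.toNat : Nat) : Int) := by
        push_cast [hdn]
        omega
      exact_mod_cast this
    rw [divisorsAux, dif_neg h, PySem.List.pyRange_one_eq_nil (by omega)]
    simp only [List.filter_nil, List.append_nil]

theorem divisors_nil (val : Int) (h : val ≤ 0) : divisors val = [] := by
  rw [divisors, divisorsAux, dif_neg (by rw [one_mul]; omega)]
  rfl

-- A's inner loop counted over the trial range, val >= 1
theorem loopA_count (p n val c : Int) (hval : 1 ≤ val) :
    loopA p n val (divisors val) c
      = c + (((PySem.List.pyRange 1 ((Nat.sqrt val.toNat : Int) + 1) 1).filter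
              (dvdP val)).countP (passB p n val) : Int) := by
  rw [loopA_eq]
  have hmem : ∀ x ∈ PySem.List.sorted (divisorsAux val 1 []) (fun x => x) false, 1 ≤ x := by
    intro x hx
    rw [PySem.List.mem_sorted] at hx
    rcases mem_divisorsAux val 1 [] le_rfl x hx with h0 | h1
    · cases h0
    · exact h1
  have hpw : (PySem.List.sorted (divisorsAux val 1 []) (fun x => x) false).Pairwise (· ≤ ·) := by
    simpa using PySem.List.sorted_pairwise (xs := divisorsAux val 1 []) (key := fun x => x)
  rw [divisors, takeWhile_eq_filter val _ hpw hmem]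
  rw [List.Perm.countP_eq _ ((PySem.List.sorted_perm _ _ _).filter _)]
  rw [filter_divisorsAux val hval 1 [] le_rfl]
  simp only [List.filter_nil, List.nil_append]

-- B's inner loop body is a counting step
theorem foldB_body (p n k q c : Int) :
    (if p * p + k + q * q ≤ 0 then c
     else
       let r := (Nat.sqrt (p * p + k + q * q).toNat : Int)
       if r * r ≠ p * p + k + q * q ∨ r ≤ q then c
       else if p + q + r > n ∨ Int.gcd (Int.gcd p q) r ≠ 1 then c
       else c + 1)
      = if predB p n k q then c + 1 else c := by
  simp only [predB]
  split_ifs <;> simp_all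

theorem foldB_eq (p n k : Int) :
    ∀ (L : List Int) (c : Int),
      L.foldl (fun c q =>
          let s := p * p + k + q * q
          if s ≤ 0 then c
          else
            let r := (Nat.sqrt s.toNat : Int)
            if r * r ≠ s ∨ r ≤ q then c
            else if p + q + r > n ∨ Int.gcd (Int.gcd p q) r ≠ 1 then c
            else c + 1) c
        = c + (L.countP (predB p n k) : Int) := by
  intro L
  induction L with
  | nil => intro c; simp
  | cons q rest ih =>
    intro c
    rw [List.foldl_cons]
    show rest.foldl _ (if p * p + k + q * q ≤ 0 then c else _) = _
    rw [show (if p * p + k + q * q ≤ 0 then c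
        else
          let r := (Nat.sqrt (p * p + k + q * q).toNat : Int)
          if r * r ≠ p * p + k + q * q ∨ r ≤ q then c
          else if p + q + r > n ∨ Int.gcd (Int.gcd p q) r ≠ 1 then c
          else c + 1) = if predB p n k q then c + 1 else c from foldB_body p n k q c]
    rw [List.countP_cons]
    by_cases hp : predB p n k q
    · rw [if_pos hp, ih, if_pos hp]; push_cast; ring
    · rw [if_neg hp, ih, if_neg hp]; push_cast; ring

-- integer square-root bridges
theorem isqrt_sq (r : Int) (hr : 0 ≤ r) : ((Nat.sqrt (r * r).toNat : Nat) : Int) = r := by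
  obtain ⟨m, hm⟩ : ∃ m : Nat, r = (m : Int) := ⟨r.toNat, (Int.toNat_of_nonneg hr).symm⟩
  subst hm
  have h1 : ((m : Int) * (m : Int)).toNat = m * m := by
    rw [← Nat.cast_mul, Int.toNat_natCast]
  rw [h1, Nat.sqrt_eq]

theorem le_isqrt_iff (val d : Int) (hv : 0 ≤ val) (hd : 0 ≤ d) :
    d ≤ ((Nat.sqrt val.toNat : Nat) : Int) ↔ d * d ≤ val := by
  obtain ⟨m, hm⟩ : ∃ m : Nat, d = (m : Int) := ⟨d.toNat, (Int.toNat_of_nonneg hd).symm⟩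
  subst hm
  rw [Nat.cast_le, Nat.le_sqrt]
  constructor
  · intro h
    have : ((m * m : Nat) : Int) ≤ ((val.toNat : Nat) : Int) := by exact_mod_cast h
    push_cast at this
    omega
  · intro h
    have : ((m * m : Nat) : Int) ≤ ((val.toNat : Nat) : Int) := by
      push_cast
      omega
    exact_mod_cast this

-- everything a passing divisor d1 of val yields about (q, r) = (qOf, rOf)
theorem passB_elim (p n val d1 : Int) (h1 : 1 ≤ d1) (hsq : d1 * d1 ≤ val)
    (hdvd : dvdP val d1 = true) (hpass : passB p n val d1 = true) :
    p ≤ qOf val d1 ∧ qOf val d1 < rOf val d1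
      ∧ rOf val d1 * rOf val d1 = val + qOf val d1 * qOf val d1
      ∧ p + qOf val d1 + rOf val d1 ≤ n
      ∧ Int.gcd (Int.gcd p (qOf val d1)) (rOf val d1) = 1
      ∧ d1 = rOf val d1 - qOf val d1 := by
  have hdvd' : PySem.Int.mod val d1 = 0 := by
    simpa [dvdP, decide_eq_true_eq] using hdvd
  have hmul : PySem.Int.floordiv val d1 * d1 = val := by
    have h := PySem.Int.floordiv_mul_add_mod val d1
    rw [hdvd'] at h
    linarith
  have hd1d2 : d1 ≤ PySem.Int.floordiv val d1 :=
    (PySem.Int.le_floordiv_iff_mul_le (by omega)).mpr hsq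
  unfold passB at hpass
  rw [show PySem.Int.floordiv (PySem.Int.floordiv val d1 - d1) 2 = qOf val d1 from rfl,
    show PySem.Int.floordiv (d1 + PySem.Int.floordiv val d1) 2 = rOf val d1 from rfl] at hpass
  split_ifs at hpass with hpar hlt hper hgcd
  push_neg at hpar
  rw [PySem.Int.mod_eq_emod_of_pos (by norm_num),
    PySem.Int.mod_eq_emod_of_pos (by norm_num)] at hpar
  have h2q : 2 * qOf val d1 = PySem.Int.floordiv val d1 - d1 := by
    rw [qOf, PySem.Int.floordiv_eq_ediv_of_pos (by norm_num)]; omega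
  have h2r : 2 * rOf val d1 = d1 + PySem.Int.floordiv val d1 := by
    rw [rOf, PySem.Int.floordiv_eq_ediv_of_pos (by norm_num)]; omega
  refine ⟨by omega, by omega, ?_, by omega, by simpa using hgcd, by omega⟩
  nlinarith [h2q, h2r, hmul]

-- building the A-side data back from a (q, r) pair
theorem passB_intro (p n val q r : Int) (hp : 1 ≤ p) (hq : p ≤ q) (hqr : q < r)
    (hsq : r * r = val + q * q) (hper : p + q + r ≤ n)
    (hgcd : Int.gcd (Int.gcd p q) r = 1) :
    PySem.Int.floordiv val (r - q) = r + q ∧ dvdP val (r - q) = true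
      ∧ (r - q) * (r - q) ≤ val ∧ passB p n val (r - q) = true
      ∧ qOf val (r - q) = q := by
  have hd1 : 1 ≤ r - q := by omega
  have hval : (r - q) * (r + q) = val := by ring_nf; linarith [hsq]
  have hflo : PySem.Int.floordiv val (r - q) = r + q := by
    rw [PySem.Int.floordiv_eq_iff_of_pos (by omega)]
    constructor
    · nlinarith
    · nlinarith
  have hdvd : dvdP val (r - q) = true := by
    simp only [dvdP, decide_eq_true_eq, PySem.Int.mod_eq_zero_iff_dvd]
    exact ⟨r + q, by linarith [hval]⟩
  have hsq1 : (r - q) * (r - q) ≤ val := by nlinarith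
  have hqv : qOf val (r - q) = q := by
    rw [qOf, hflo, PySem.Int.floordiv_eq_ediv_of_pos (by norm_num)]
    have : r + q - (r - q) = 2 * q := by ring
    rw [this]
    omega
  have hrv : rOf val (r - q) = r := by
    rw [rOf, hflo, PySem.Int.floordiv_eq_ediv_of_pos (by norm_num)]
    have : r - q + (r + q) = 2 * r := by ring
    rw [this]
    omega
  refine ⟨hflo, hdvd, hsq1, ?_, hqv⟩
  unfold passB
  rw [show PySem.Int.floordiv (PySem.Int.floordiv val (r - q) - (r - q)) 2 = qOf val (r - q)
      from rfl,
    show PySem.Int.floordiv (r - q + PySem.Int.floordiv val (r - q)) 2 = rOf val (r - q)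
      from rfl,
    hqv, hrv, hflo]
  have hpar : ¬ (PySem.Int.mod (r - q) 2 ≠ PySem.Int.mod (r + q) 2) := by
    rw [PySem.Int.mod_eq_emod_of_pos (by norm_num),
      PySem.Int.mod_eq_emod_of_pos (by norm_num)]
    omega
  rw [if_neg hpar, if_neg (by omega), if_neg (by omega), if_neg (by simpa using hgcd)]

-- everything a passing q yields about r = rB
theorem predB_elim (p n k q : Int) (hpred : predB p n k q = true) :
    rB p k q * rB p k q = p * p + k + q * q ∧ q < rB p k q
      ∧ p + q + rB p k q ≤ n ∧ Int.gcd (Int.gcd p q) (rB p k q) = 1 := by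
  unfold predB at hpred
  rw [show (Nat.sqrt (p * p + k + q * q).toNat : Int) = rB p k q from rfl] at hpred
  split_ifs at hpred with h0 h1 h2
  push_neg at h1 h2
  exact ⟨h1.1, by omega, by omega, by simpa using h2.2⟩

theorem predB_intro (p n k q r : Int) (hq : 0 ≤ q) (hqr : q < r)
    (hsq : r * r = p * p + k + q * q) (hper : p + q + r ≤ n)
    (hgcd : Int.gcd (Int.gcd p q) r = 1) :
    predB p n k q = true ∧ rB p k q = r := by
  have hr0 : 0 ≤ r := by omega
  have hrB : rB p k q = r := by
    rw [rB, ← hsq, isqrt_sq r hr0]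
  have hspos : ¬ (p * p + k + q * q ≤ 0) := by nlinarith
  refine ⟨?_, hrB⟩
  unfold predB
  rw [if_neg hspos]
  rw [show (Nat.sqrt (p * p + k + q * q).toNat : Int) = rB p k q from rfl, hrB]
  rw [if_neg (by push_neg; exact ⟨hsq, by omega⟩), if_neg (by push_neg; exact ⟨by omega, by simpa using hgcd⟩)]

-- countP over a 1-step range as a Finset card
theorem countP_pyRange_eq_card (a b : Int) (pb : Int → Bool) :
    (PySem.List.pyRange a b 1).countP pb
      = ((Finset.Icc a (b - 1)).filter (fun x => pb x = true)).card := by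
  rw [List.countP_eq_length_filter]
  have hnd : ((PySem.List.pyRange a b 1).filter pb).Nodup :=
    (PySem.List.nodup_pyRange_one a b).filter pb
  rw [← List.toFinset_card_of_nodup hnd]
  congr 1
  ext x
  simp only [List.mem_toFinset, List.mem_filter, PySem.List.mem_pyRange_one,
    Finset.mem_filter, Finset.mem_Icc]
  constructor
  · rintro ⟨⟨h1, h2⟩, h3⟩; exact ⟨⟨h1, by omega⟩, h3⟩
  · rintro ⟨⟨h1, h2⟩, h3⟩; exact ⟨⟨h1, by omega⟩, h3⟩

-- the central counting bijection d1 <-> q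
theorem countA_eq_countB (p n k : Int) (hp : 1 ≤ p) (hval : 1 ≤ p * p + k) :
    ((PySem.List.pyRange 1 ((Nat.sqrt (p * p + k).toNat : Int) + 1) 1).filter
        (dvdP (p * p + k))).countP (passB p n (p * p + k))
      = (PySem.List.pyRange p (PySem.Int.floordiv (n - p - 1) 2 + 1) 1).countP (predB p n k) := by
  rw [List.countP_filter, countP_pyRange_eq_card, countP_pyRange_eq_card]
  apply Finset.card_bij' (i := fun d1 _ => qOf (p * p + k) d1)
    (j := fun q _ => rB p k q - q)
  · -- hi : image lands in t
    intro d1 hd1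
    simp only [Finset.mem_filter, Finset.mem_Icc, Bool.and_eq_true, decide_eq_true_eq] at hd1 ⊢
    obtain ⟨⟨ha1, ha2⟩, hpass, hdvd⟩ := hd1
    have hsq : d1 * d1 ≤ p * p + k := by
      rw [← le_isqrt_iff _ _ (by omega) (by omega)]; omega
    obtain ⟨hq1, hq2, hq3, hq4, hq5, hq6⟩ := passB_elim p n (p * p + k) d1 ha1 hsq hdvd hpass
    obtain ⟨hpred, _⟩ := predB_intro p n k (qOf (p * p + k) d1) (rOf (p * p + k) d1)
      (by omega) hq2 (by linarith) hq4 hq5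
    refine ⟨⟨hq1, ?_⟩, hpred⟩
    have h2 : qOf (p * p + k) d1 ≤ PySem.Int.floordiv (n - p - 1) 2 := by
      rw [PySem.Int.le_floordiv_iff_mul_le (by norm_num)]
      omega
    omega
  · -- hj : inverse image lands in s
    intro q hq
    simp only [Finset.mem_filter, Finset.mem_Icc, Bool.and_eq_true, decide_eq_true_eq] at hq ⊢
    obtain ⟨⟨hb1, hb2⟩, hpred⟩ := hq
    obtain ⟨hr1, hr2, hr3, hr4⟩ := predB_elim p n k q hpred
    obtain ⟨hflo, hdvd, hsq1, hpass, hqv⟩ := passB_intro p n (p * p + k) q (rB p k q)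
      hp hb1 hr2 (by linarith) hr3 hr4
    refine ⟨⟨by omega, ?_⟩, hpass, hdvd⟩
    have := (le_isqrt_iff (p * p + k) (rB p k q - q) (by omega) (by omega)).mpr hsq1
    omega
  · -- left inverse
    intro d1 hd1
    simp only [Finset.mem_filter, Finset.mem_Icc, Bool.and_eq_true, decide_eq_true_eq] at hd1
    obtain ⟨⟨ha1, ha2⟩, hpass, hdvd⟩ := hd1
    have hsq : d1 * d1 ≤ p * p + k := by
      rw [← le_isqrt_iff _ _ (by omega) (by omega)]; omega
    obtain ⟨hq1, hq2, hq3, hq4, hq5, hq6⟩ := passB_elim p n (p * p + k) d1 ha1 hsq hdvd hpass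
    obtain ⟨_, hrB⟩ := predB_intro p n k (qOf (p * p + k) d1) (rOf (p * p + k) d1)
      (by omega) hq2 (by linarith) hq4 hq5
    rw [hrB]
    omega
  · -- right inverse
    intro q hq
    simp only [Finset.mem_filter, Finset.mem_Icc, Bool.and_eq_true, decide_eq_true_eq] at hq
    obtain ⟨⟨hb1, hb2⟩, hpred⟩ := hq
    obtain ⟨hr1, hr2, hr3, hr4⟩ := predB_elim p n k q hpred
    obtain ⟨hflo, hdvd, hsq1, hpass, hqv⟩ := passB_intro p n (p * p + k) q (rB p k q)
      hp hb1 hr2 (by linarith) hr3 hr4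
    exact hqv

-- when val <= 0 no q passes B's test
theorem predB_false_nonpos (p n k q : Int) (hq : 0 ≤ q) (hval : p * p + k ≤ 0) :
    predB p n k q = false := by
  by_contra h
  have hpred : predB p n k q = true := by
    cases hb : predB p n k q
    · exact absurd hb h
    · rfl
  obtain ⟨hr1, hr2, _, _⟩ := predB_elim p n k q hpred
  nlinarith

-- the two inner loops agree for every p >= 1
theorem inner_eq (p n k c : Int) (hp : 1 ≤ p) :
    loopA p n (p * p + k) (divisors (p * p + k)) c
      = (PySem.List.pyRange p (PySem.Int.floordiv (n - p - 1) 2 + 1) 1).foldl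
          (fun c q =>
            let s := p * p + k + q * q
            if s ≤ 0 then c
            else
              let r := (Nat.sqrt s.toNat : Int)
              if r * r ≠ s ∨ r ≤ q then c
              else if p + q + r > n ∨ Int.gcd (Int.gcd p q) r ≠ 1 then c
              else c + 1) c := by
  rw [foldB_eq]
  by_cases hval : p * p + k ≤ 0
  · rw [divisors_nil _ hval]
    have h0 : (PySem.List.pyRange p (PySem.Int.floordiv (n - p - 1) 2 + 1) 1).countP
        (predB p n k) = 0 := by
      rw [List.countP_eq_zero]
      intro q hmem
      rw [PySem.List.mem_pyRange_one] at hmem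
      simp [predB_false_nonpos p n k q (by omega) hval]
    rw [h0]
    simp [loopA]
  · rw [loopA_count p n (p * p + k) c (by omega),
      countA_eq_countB p n k hp (by omega)]

-- ===== VERDICT =====
theorem P_k_spec : Claim_equal_P_k := by
  intro k n _
  unfold Spec_P_k P_k P_k_alt
  apply PySem.List.foldl_congr_mem
  intro c p hmem
  rw [PySem.List.mem_pyRange_one] at hmem
  exact inner_eq p n k c (by omega)
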